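-- pv_equiv track=rewrite | github.com/enderjnets/Solana-Cripto-Trader | bittrader/agents/producer.py | _segment_fallback_prompts
-- ===== SOURCE A (Python) =====
-- RHINO_BASE_SHORT = (
--     "anthropomorphic rhinoceros character, hyper-realistic 3D render, "
--     "muscular but elegant, wearing modern casual trading clothes, "
--     "expressive face, dramatic cinematic lighting, "
--     "ultra HD, photorealistic textures, 9:16 vertical aspect ratio, dark moody background"
-- )
--
-- RHINO_BASE_LONG = (
--     "anthropomorphic rhinoceros character, hyper-realistic 3D render, "
--     "muscular but elegant, wearing modern casual trading clothes, "
--     "expressive face, dramatic cinematic lighting, "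
--     "ultra HD, photorealistic textures, 16:9 widescreen, dark moody background"
-- )
--
-- def _segment_fallback_prompts(segments: list, video_type: str) -> list:
--     """Generate fallback prompts from segment keywords without LLM."""
--     base = RHINO_BASE_SHORT if video_type == "short" else RHINO_BASE_LONG
--     aspect = "9:16" if video_type == "short" else "16:9"
--
--     # Keyword → scene mapping for semantic sync
--     KEYWORD_SCENES = [
--         (["bitcoin", "btc"], "holding a golden Bitcoin coin with dramatic orange glow, city skyline at night behind"),
--         (["ethereum", "eth"], "examining a glowing Ethereum crystal on a holographic display, tech lab"),
--         (["exchange", "coinbase", "binance", "comprar", "buy"], "using smartphone to navigate a crypto exchange app, green purchase confirmed screen"),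
--         (["$100", "100 dolar", "empezar", "principiante", "beginner"], "holding a $100 bill transforming into digital coins, warm golden light"),
--         (["dca", "dollar cost", "semana", "week", "calendar"], "marking dates on a calendar with a pen, planning crypto purchases systematically"),
--         (["riesgo", "risk", "pérdida", "loss", "caer", "red"], "staring at a red crashing chart on a large monitor, concerned expression, red ambient light"),
--         (["subir", "ganancia", "profit", "green", "alcista", "bull"], "celebrating in front of multiple green profit charts, triumphant pose, golden lighting"),
--         (["error", "mistake", "fomo", "panic", "liquidar"], "face-palming at a phone showing a bad trade, dramatic tense lighting"),
--         (["wallet", "hardware", "ledger", "security", "seguridad"], "carefully placing crypto hardware wallet in a secure box, focused expression"),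
--         (["telegram", "scam", "estafa", "señales", "signal"], "pointing at a suspicious phone message with a warning look, dark moody setting"),
--         (["leverage", "apalancamiento"], "standing next to a giant multiplier dial set to 100x, cautionary expression, warning lights"),
--         (["estrategia", "strategy", "plan"], "drawing a strategic plan on a whiteboard with crypto symbols, confident pose"),
--         (["exchange", "registro", "verificar", "kyc"], "completing identity verification on a laptop, official-looking process, clean office"),
--         (["altcoin", "solana", "bnb", "top 10"], "browsing a holographic list of top crypto coins, analytical expression, data streams"),
--         (["wallet", "cold storage", "guardar"], "securing digital assets in a vault with blockchain locks, dramatic lighting"),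
--     ]
--
--     fallback_settings = [
--         "trading desk with multiple monitors showing crypto charts",
--         "modern city rooftop at sunset with holographic data displays",
--         "futuristic server room with blue digital streams",
--         "minimalist home office with warm morning light",
--         "dark command center with wall-sized trading screens",
--         "crypto conference stage under dramatic spotlights",
--         "high-tech mobile workstation in a coffee shop",
--         "financial district street with digital billboard displays",
--         "underground crypto bunker with glowing hardware",
--         "penthouse office overlooking a digital city skyline",
--         "outdoor plaza with giant holographic crypto charts",
--         "studio workspace with portfolio data projections",
--         "open-plan office with green trading terminals",
--         "garage setup with multiple screens and hardware wallets",
--         "train or transit with mobile crypto setup",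
--         "zen garden with floating digital asset symbols",
--     ]
--
--     used_settings = set()
--     prompts = []
--
--     for i, seg in enumerate(segments):
--         seg_lower = seg.lower()
--
--         # Find best matching scene from keyword map
--         scene_desc = None
--         for keywords, scene in KEYWORD_SCENES:
--             if any(kw in seg_lower for kw in keywords):
--                 scene_desc = scene
--                 break
--
--         # Pick a setting that hasn't been used
--         setting = None
--         for s in fallback_settings:
--             if s not in used_settings:
--                 setting = s
--                 used_settings.add(s)
--                 break
--         if not setting:
--             setting = f"unique location {i+1}, dramatic cinematic environment"
--
--         if scene_desc:
--             prompt = f"Anthropomorphic rhinoceros {scene_desc}, {setting}, {base}"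
--         else:
--             # Generic but unique
--             actions = [
--                 "analyzing holographic candlestick charts",
--                 "pointing confidently at rising price data",
--                 "checking portfolio on dual monitors",
--                 "reviewing blockchain transaction data",
--                 "calculating trading strategy on a tablet",
--                 "celebrating a successful trade execution",
--                 "studying market patterns with focused expression",
--                 "typing trading commands on a glowing keyboard",
--             ]
--             action = actions[i % len(actions)]
--             prompt = f"Anthropomorphic rhinoceros {action}, {setting}, {aspect} aspect ratio, {base}"
--
--         prompts.append(prompt)
--
--     return prompts
-- ===== SOURCE B (Python) =====
-- RHINO_BASE_SHORT = (
--     "anthropomorphic rhinoceros character, hyper-realistic 3D render, "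
--     "muscular but elegant, wearing modern casual trading clothes, "
--     "expressive face, dramatic cinematic lighting, "
--     "ultra HD, photorealistic textures, 9:16 vertical aspect ratio, dark moody background"
-- )
--
-- RHINO_BASE_LONG = (
--     "anthropomorphic rhinoceros character, hyper-realistic 3D render, "
--     "muscular but elegant, wearing modern casual trading clothes, "
--     "expressive face, dramatic cinematic lighting, "
--     "ultra HD, photorealistic textures, 16:9 widescreen, dark moody background"
-- )
--
-- KEYWORD_SCENES = [
--     (["bitcoin", "btc"], "holding a golden Bitcoin coin with dramatic orange glow, city skyline at night behind"),
--     (["ethereum", "eth"], "examining a glowing Ethereum crystal on a holographic display, tech lab"),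
--     (["exchange", "coinbase", "binance", "comprar", "buy"], "using smartphone to navigate a crypto exchange app, green purchase confirmed screen"),
--     (["$100", "100 dolar", "empezar", "principiante", "beginner"], "holding a $100 bill transforming into digital coins, warm golden light"),
--     (["dca", "dollar cost", "semana", "week", "calendar"], "marking dates on a calendar with a pen, planning crypto purchases systematically"),
--     (["riesgo", "risk", "pérdida", "loss", "caer", "red"], "staring at a red crashing chart on a large monitor, concerned expression, red ambient light"),
--     (["subir", "ganancia", "profit", "green", "alcista", "bull"], "celebrating in front of multiple green profit charts, triumphant pose, golden lighting"),
--     (["error", "mistake", "fomo", "panic", "liquidar"], "face-palming at a phone showing a bad trade, dramatic tense lighting"),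
--     (["wallet", "hardware", "ledger", "security", "seguridad"], "carefully placing crypto hardware wallet in a secure box, focused expression"),
--     (["telegram", "scam", "estafa", "señales", "signal"], "pointing at a suspicious phone message with a warning look, dark moody setting"),
--     (["leverage", "apalancamiento"], "standing next to a giant multiplier dial set to 100x, cautionary expression, warning lights"),
--     (["estrategia", "strategy", "plan"], "drawing a strategic plan on a whiteboard with crypto symbols, confident pose"),
--     (["exchange", "registro", "verificar", "kyc"], "completing identity verification on a laptop, official-looking process, clean office"),
--     (["altcoin", "solana", "bnb", "top 10"], "browsing a holographic list of top crypto coins, analytical expression, data streams"),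
--     (["wallet", "cold storage", "guardar"], "securing digital assets in a vault with blockchain locks, dramatic lighting"),
-- ]
--
-- FALLBACK_SETTINGS = [
--     "trading desk with multiple monitors showing crypto charts",
--     "modern city rooftop at sunset with holographic data displays",
--     "futuristic server room with blue digital streams",
--     "minimalist home office with warm morning light",
--     "dark command center with wall-sized trading screens",
--     "crypto conference stage under dramatic spotlights",
--     "high-tech mobile workstation in a coffee shop",
--     "financial district street with digital billboard displays",
--     "underground crypto bunker with glowing hardware",
--     "penthouse office overlooking a digital city skyline",
--     "outdoor plaza with giant holographic crypto charts",
--     "studio workspace with portfolio data projections",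
--     "open-plan office with green trading terminals",
--     "garage setup with multiple screens and hardware wallets",
--     "train or transit with mobile crypto setup",
--     "zen garden with floating digital asset symbols",
-- ]
--
-- GENERIC_ACTIONS = [
--     "analyzing holographic candlestick charts",
--     "pointing confidently at rising price data",
--     "checking portfolio on dual monitors",
--     "reviewing blockchain transaction data",
--     "calculating trading strategy on a tablet",
--     "celebrating a successful trade execution",
--     "studying market patterns with focused expression",
--     "typing trading commands on a glowing keyboard",
-- ]
--
--
-- def _prompt_for(i: int, seg: str, base: str, aspect: str) -> str:
--     seg_lower = seg.lower()
--     scene_desc = next(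
--         (scene for keywords, scene in KEYWORD_SCENES
--          if any(kw in seg_lower for kw in keywords)),
--         None,
--     )
--     # Settings are consumed strictly in order, so the i-th segment gets the i-th one.
--     if i < len(FALLBACK_SETTINGS):
--         setting = FALLBACK_SETTINGS[i]
--     else:
--         setting = f"unique location {i+1}, dramatic cinematic environment"
--     if scene_desc:
--         return f"Anthropomorphic rhinoceros {scene_desc}, {setting}, {base}"
--     action = GENERIC_ACTIONS[i % len(GENERIC_ACTIONS)]
--     return f"Anthropomorphic rhinoceros {action}, {setting}, {aspect} aspect ratio, {base}"
--
--
-- def _segment_fallback_prompts(segments: list, video_type: str) -> list: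
--     base = RHINO_BASE_SHORT if video_type == "short" else RHINO_BASE_LONG
--     aspect = "9:16" if video_type == "short" else "16:9"
--     return [_prompt_for(i, seg, base, aspect) for i, seg in enumerate(segments)]
-- ===== Notes on version B (the rewrite author's own statement) =====
-- stated objective: simpler
-- what changed: B replaces the stateful loop with its used_settings set and inner first-unused scan by a pure per-index prompt builder (setting picked directly by index) mapped over enumerate(segments).
import Mathlib
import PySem

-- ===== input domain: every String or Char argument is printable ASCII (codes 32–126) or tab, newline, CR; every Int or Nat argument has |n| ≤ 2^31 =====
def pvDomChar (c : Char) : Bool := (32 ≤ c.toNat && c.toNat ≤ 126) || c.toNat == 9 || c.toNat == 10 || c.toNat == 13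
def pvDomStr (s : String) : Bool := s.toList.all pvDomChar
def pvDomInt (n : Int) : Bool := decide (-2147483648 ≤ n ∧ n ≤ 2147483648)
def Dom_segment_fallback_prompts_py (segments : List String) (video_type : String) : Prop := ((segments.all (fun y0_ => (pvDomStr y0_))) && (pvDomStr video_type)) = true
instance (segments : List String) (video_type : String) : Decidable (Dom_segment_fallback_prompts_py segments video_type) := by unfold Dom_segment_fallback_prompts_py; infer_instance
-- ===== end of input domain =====

-- B drops the used_settings set and its first-unused inner scan: settings are consumed
-- strictly in order, so each segment's setting is picked directly by index, and the loop
-- with mutable state becomes a pure per-index builder mapped over the enumeration (simpler).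

-- shared module-level string constants (identical literals in both Pythons)
def pvRhinoShort : String :=
  "anthropomorphic rhinoceros character, hyper-realistic 3D render, muscular but elegant, wearing modern casual trading clothes, expressive face, dramatic cinematic lighting, ultra HD, photorealistic textures, 9:16 vertical aspect ratio, dark moody background"
def pvRhinoLong : String :=
  "anthropomorphic rhinoceros character, hyper-realistic 3D render, muscular but elegant, wearing modern casual trading clothes, expressive face, dramatic cinematic lighting, ultra HD, photorealistic textures, 16:9 widescreen, dark moody background"

def pvKeywordScenes : List (List String × String) := [
  (["bitcoin", "btc"], "holding a golden Bitcoin coin with dramatic orange glow, city skyline at night behind"),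
  (["ethereum", "eth"], "examining a glowing Ethereum crystal on a holographic display, tech lab"),
  (["exchange", "coinbase", "binance", "comprar", "buy"], "using smartphone to navigate a crypto exchange app, green purchase confirmed screen"),
  (["$100", "100 dolar", "empezar", "principiante", "beginner"], "holding a $100 bill transforming into digital coins, warm golden light"),
  (["dca", "dollar cost", "semana", "week", "calendar"], "marking dates on a calendar with a pen, planning crypto purchases systematically"),
  (["riesgo", "risk", "pérdida", "loss", "caer", "red"], "staring at a red crashing chart on a large monitor, concerned expression, red ambient light"),
  (["subir", "ganancia", "profit", "green", "alcista", "bull"], "celebrating in front of multiple green profit charts, triumphant pose, golden lighting"),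
  (["error", "mistake", "fomo", "panic", "liquidar"], "face-palming at a phone showing a bad trade, dramatic tense lighting"),
  (["wallet", "hardware", "ledger", "security", "seguridad"], "carefully placing crypto hardware wallet in a secure box, focused expression"),
  (["telegram", "scam", "estafa", "señales", "signal"], "pointing at a suspicious phone message with a warning look, dark moody setting"),
  (["leverage", "apalancamiento"], "standing next to a giant multiplier dial set to 100x, cautionary expression, warning lights"),
  (["estrategia", "strategy", "plan"], "drawing a strategic plan on a whiteboard with crypto symbols, confident pose"),
  (["exchange", "registro", "verificar", "kyc"], "completing identity verification on a laptop, official-looking process, clean office"),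
  (["altcoin", "solana", "bnb", "top 10"], "browsing a holographic list of top crypto coins, analytical expression, data streams"),
  (["wallet", "cold storage", "guardar"], "securing digital assets in a vault with blockchain locks, dramatic lighting")]

def pvFallbackSettings : List String := [
  "trading desk with multiple monitors showing crypto charts",
  "modern city rooftop at sunset with holographic data displays",
  "futuristic server room with blue digital streams",
  "minimalist home office with warm morning light",
  "dark command center with wall-sized trading screens",
  "crypto conference stage under dramatic spotlights",
  "high-tech mobile workstation in a coffee shop",
  "financial district street with digital billboard displays",
  "underground crypto bunker with glowing hardware",
  "penthouse office overlooking a digital city skyline",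
  "outdoor plaza with giant holographic crypto charts",
  "studio workspace with portfolio data projections",
  "open-plan office with green trading terminals",
  "garage setup with multiple screens and hardware wallets",
  "train or transit with mobile crypto setup",
  "zen garden with floating digital asset symbols"]

def pvActions : List String := [
  "analyzing holographic candlestick charts",
  "pointing confidently at rising price data",
  "checking portfolio on dual monitors",
  "reviewing blockchain transaction data",
  "calculating trading strategy on a tablet",
  "celebrating a successful trade execution",
  "studying market patterns with focused expression",
  "typing trading commands on a glowing keyboard"]

-- ===== PORT A =====
-- 'for keywords, scene in KEYWORD_SCENES: if any(...): scene_desc = scene; break'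
def pvFindSceneA : List (List String × String) → String → Option String
  | [], _ => none
  | (kws, scene) :: rest, s =>
    if kws.any (fun kw => PySem.Str.isIn kw s) then some scene else pvFindSceneA rest s

-- 'for s in fallback_settings: if s not in used_settings: setting = s; used_settings.add(s); break'
def pvPickSettingA (used : PySem.Set String) : List String → Option String
  | [] => none
  | s :: rest => if used.contains s then pvPickSettingA used rest else some s

-- the main 'for i, seg in enumerate(segments)' loop, state = (used_settings, remaining)
def pvAGo (base aspect : String) (i : Nat) (used : PySem.Set String) : List String → List String
  | [] => []
  | seg :: rest =>
    let segLower := PySem.Str.lower seg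
    let sceneDesc := pvFindSceneA pvKeywordScenes segLower
    let su : String × PySem.Set String :=
      match pvPickSettingA used pvFallbackSettings with
      | some s => (s, PySem.Set.add used s)
      | none => ("unique location " ++ PySem.Int.toStr ((i : Int) + 1) ++ ", dramatic cinematic environment", used)
    let prompt :=
      match sceneDesc with
      | some sc => "Anthropomorphic rhinoceros " ++ sc ++ ", " ++ su.1 ++ ", " ++ base
      | none => "Anthropomorphic rhinoceros " ++ pvActions.getD (i % pvActions.length) "" ++ ", " ++ su.1 ++ ", " ++ aspect ++ " aspect ratio, " ++ base
    prompt :: pvAGo base aspect (i + 1) su.2 rest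

def segment_fallback_prompts_py (segments : List String) (video_type : String) : List String :=
  let base := if video_type == "short" then pvRhinoShort else pvRhinoLong
  let aspect := if video_type == "short" then "9:16" else "16:9"
  pvAGo base aspect 0 PySem.Set.empty segments

-- ===== PORT B =====
-- B's per-index prompt builder: first matching scene via find?, setting by direct index
def pvPromptForB (i : Nat) (seg base aspect : String) : String :=
  let segLower := PySem.Str.lower seg
  let sceneDesc := (pvKeywordScenes.find? (fun p => p.1.any (fun kw => PySem.Str.isIn kw segLower))).map (·.2)
  let setting :=
    if i < pvFallbackSettings.length then pvFallbackSettings.getD i ""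
    else "unique location " ++ PySem.Int.toStr ((i : Int) + 1) ++ ", dramatic cinematic environment"
  match sceneDesc with
  | some sc => "Anthropomorphic rhinoceros " ++ sc ++ ", " ++ setting ++ ", " ++ base
  | none => "Anthropomorphic rhinoceros " ++ pvActions.getD (i % pvActions.length) "" ++ ", " ++ setting ++ ", " ++ aspect ++ " aspect ratio, " ++ base

def segment_fallback_prompts_py_alt (segments : List String) (video_type : String) : List String :=
  let base := if video_type == "short" then pvRhinoShort else pvRhinoLong
  let aspect := if video_type == "short" then "9:16" else "16:9"
  segments.zipIdx.map (fun p => pvPromptForB p.2 p.1 base aspect)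

-- ===== PRECONDITION & SPEC =====
def Spec_segment_fallback_prompts_py (segments : List String) (video_type : String) (out : List String) : Prop := out = segment_fallback_prompts_py_alt segments video_type
instance (segments : List String) (video_type : String) (out : List String) : Decidable (Spec_segment_fallback_prompts_py segments video_type out) := by unfold Spec_segment_fallback_prompts_py; infer_instance

-- ===== CLAIM (what is proved, stated in full; the proofs are below) =====
def Claim_equal_segment_fallback_prompts_py : Prop := ∀ (segments : List String) (video_type : String), Dom_segment_fallback_prompts_py segments video_type → Spec_segment_fallback_prompts_py segments video_type (segment_fallback_prompts_py segments video_type)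

-- ===== LEMMAS AND PROOFS =====

-- A's first-match scene scan is find? followed by projection
theorem pvFindSceneA_eq (l : List (List String × String)) (s : String) :
    pvFindSceneA l s = (l.find? (fun p => p.1.any (fun kw => PySem.Str.isIn kw s))).map (·.2) := by
  induction l with
  | nil => rfl
  | cons hd tl ih =>
    obtain ⟨kws, sc⟩ := hd
    rw [pvFindSceneA, List.find?_cons]
    cases hc : kws.any (fun kw => PySem.Str.isIn kw s) <;> simp [ih]

-- find? congruence under a pointwise-equal predicate
theorem pvFind?_congr {α : Type} (p q : α → Bool) (l : List α) (h : ∀ a ∈ l, p a = q a) :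
    l.find? p = l.find? q := by
  induction l with
  | nil => rfl
  | cons x t ih =>
    rw [List.find?_cons, List.find?_cons, h x (by simp)]
    cases q x
    · exact ih (fun a ha => h a (by simp [ha]))
    · rfl

-- A's first-unused scan is find? over the settings
theorem pvPick_eq_find (used : PySem.Set String) (l : List String) :
    pvPickSettingA used l = l.find? (fun s => !used.contains s) := by
  induction l with
  | nil => rfl
  | cons x t ih =>
    rw [pvPickSettingA, List.find?_cons]
    cases hc : used.contains x <;> simp [ih]

-- on a duplicate-free list, the first element not among the first k is the k-th
theorem pvFind_take (xs : List String) (hnd : xs.Nodup) :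
    ∀ k : Nat, xs.find? (fun s => !(xs.take k).contains s) = xs[k]? := by
  induction xs with
  | nil => intro k; rfl
  | cons x t ih =>
    intro k
    cases k with
    | zero => simp
    | succ k =>
      have hx : x ∉ t := (List.nodup_cons.mp hnd).1
      rw [List.take_succ_cons, List.find?_cons]
      have hhead : (!(x :: t.take k).contains x) = false := by simp
      rw [hhead]
      have hcongr : ∀ a ∈ t, (!(x :: t.take k).contains a) = (!(t.take k).contains a) := by
        intro a ha
        have hax : a ≠ x := fun he => hx (he ▸ ha)
        simp [hax]
      rw [pvFind?_congr _ _ t hcongr, ih (List.nodup_cons.mp hnd).2 k]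
      simp

theorem pvNodupSettings : pvFallbackSettings.Nodup := by decide

set_option maxRecDepth 8192 in
theorem pvLoop_eq (base aspect : String) (segs : List String) : ∀ i : Nat,
    pvAGo base aspect i (pvFallbackSettings.take i) segs =
      (segs.zipIdx i).map (fun p => pvPromptForB p.2 p.1 base aspect) := by
  induction segs with
  | nil => intro i; rfl
  | cons seg rest ih =>
    intro i
    rw [List.zipIdx_cons, List.map_cons, pvAGo, ← ih (i + 1)]
    have hpick : pvPickSettingA (pvFallbackSettings.take i) pvFallbackSettings = pvFallbackSettings[i]? := by
      rw [pvPick_eq_find]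
      simp only [PySem.Set.contains]
      rw [pvFind_take _ pvNodupSettings]
    by_cases hlen : i < pvFallbackSettings.length
    · have hget : pvFallbackSettings[i]? = some pvFallbackSettings[i] := List.getElem?_eq_getElem hlen
      have hnm : pvFallbackSettings[i] ∉ pvFallbackSettings.take i := by
        intro hmem
        rw [List.mem_take_iff_getElem] at hmem
        obtain ⟨j, hj, hEq⟩ := hmem
        have : j = i := (List.Nodup.getElem_inj_iff pvNodupSettings).mp hEq
        omega
      have hadd : PySem.Set.add (pvFallbackSettings.take i) pvFallbackSettings[i] = pvFallbackSettings.take (i + 1) := by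
        have hc : PySem.Set.contains (pvFallbackSettings.take i) pvFallbackSettings[i] = false := by
          simpa [PySem.Set.contains] using hnm
        unfold PySem.Set.add
        rw [hc, if_neg (by simp : ¬(false = true)), List.take_add_one, hget]
        rfl
      simp only [pvPromptForB, pvFindSceneA_eq, hpick, hget, hadd, if_pos hlen,
        List.getD_eq_getElem _ _ hlen]
    · have h16 : pvFallbackSettings.length ≤ i := Nat.le_of_not_lt hlen
      have hfull : pvFallbackSettings.take i = pvFallbackSettings := List.take_of_length_le h16
      have hfull' : pvFallbackSettings.take (i + 1) = pvFallbackSettings := List.take_of_length_le (Nat.le_succ_of_le h16)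
      have hnone : pvFallbackSettings[i]? = none := List.getElem?_eq_none h16
      rw [hfull, hfull']
      rw [hfull] at hpick
      simp only [pvPromptForB, pvFindSceneA_eq, hpick, hnone, if_neg hlen]

-- ===== VERDICT (by name: the statement is the Claim_ definition above) =====
theorem segment_fallback_prompts_py_spec : Claim_equal_segment_fallback_prompts_py := by
  intro segments video_type _
  unfold Spec_segment_fallback_prompts_py segment_fallback_prompts_py segment_fallback_prompts_py_alt
  simpa using pvLoop_eq _ _ segments 0
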